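-- pv_equiv track=rewrite | github.com/ViniGuimaraes/Mathematics | Mistos/Determinação de ternas pitagóricas por um dos catetos ou pela hipotenusa.py | quadrado
-- ===== SOURCE A (Python) =====
-- def quadrado(c):
--     a = 0
--     i = 1
--     n = 0
--     while 5+4*(i-1)<=c:
--         if 5+4*(i-1) == c:
--             a = True
--             break
--         i+=1
--     if a == True:
--         for n in range(1, i+1):
--             if i == n**2:
--                 return True
--         return False
--     else:
--         return False
-- ===== SOURCE B (Python) =====
-- def quadrado(c):
--     if c < 5 or (c - 5) % 4 != 0:
--         return False
--     i = (c - 1) // 4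
--     lo, hi = 0, i
--     while lo < hi:
--         mid = (lo + hi + 1) // 2
--         if mid * mid <= i:
--             lo = mid
--         else:
--             hi = mid - 1
--     return lo * lo == i
-- ===== Notes on version B (the rewrite author's own statement) =====
-- stated objective: faster
-- what changed: Replaced A's linear scan for the loop index and its subsequent linear perfect-square search by a direct congruence-and-bound test plus a logarithmic binary-search integer square root.
import Mathlib
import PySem

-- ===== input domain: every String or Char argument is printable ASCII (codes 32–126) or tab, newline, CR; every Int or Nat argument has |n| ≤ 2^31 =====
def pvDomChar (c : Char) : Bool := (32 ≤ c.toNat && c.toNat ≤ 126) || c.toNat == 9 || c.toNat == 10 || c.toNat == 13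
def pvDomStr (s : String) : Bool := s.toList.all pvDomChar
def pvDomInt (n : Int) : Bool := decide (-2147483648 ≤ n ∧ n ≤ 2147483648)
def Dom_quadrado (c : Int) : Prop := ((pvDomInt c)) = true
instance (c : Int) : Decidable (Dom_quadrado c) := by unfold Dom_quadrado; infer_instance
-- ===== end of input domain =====

-- B replaces A's linear scan and linear perfect-square search by a direct mod-4 test and a binary-search integer square root (faster).

-- ===== PORT A =====
-- A's while loop: returns some i if 5+4*(i-1) = c was hit (a = True with that i), none otherwise
def quadLoopA (c i : Int) : Option Int :=
  if 5 + 4 * (i - 1) ≤ c then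
    if 5 + 4 * (i - 1) = c then some i
    else quadLoopA c (i + 1)
  else none
termination_by (c - (5 + 4 * (i - 1))).toNat
decreasing_by omega

def quadrado (c : Int) : Bool :=
  match quadLoopA c 1 with
  | some i => (PySem.List.pyRange 1 (i + 1) 1).any (fun n => decide (i = n ^ 2))
  | none => false

-- ===== PORT B =====
-- needed by bsq's decreasing_by: the binary-search midpoint lies strictly between lo and hi
theorem bsq_mid_bounds (lo hi : Int) (h : lo < hi) :
    lo < PySem.Int.floordiv (lo + hi + 1) 2 ∧ PySem.Int.floordiv (lo + hi + 1) 2 ≤ hi := by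
  simp only [PySem.Int.floordiv, Int.fdiv_eq_ediv]
  omega

-- binary search for the integer square root of i on [lo, hi]
def bsq (i lo hi : Int) : Int :=
  if h : lo < hi then
    let mid := PySem.Int.floordiv (lo + hi + 1) 2
    if mid * mid ≤ i then bsq i mid hi else bsq i lo (mid - 1)
  else lo
termination_by (hi - lo).toNat
decreasing_by
  · have := bsq_mid_bounds lo hi h; omega
  · have := bsq_mid_bounds lo hi h; omega

def quadrado_alt (c : Int) : Bool :=
  if c < 5 || PySem.Int.mod (c - 5) 4 != 0 then false
  else
    let i := PySem.Int.floordiv (c - 1) 4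
    let lo := bsq i 0 i
    decide (lo * lo = i)

-- ===== PRECONDITION & SPEC =====
def Spec_quadrado (c : Int) (out : Bool) : Prop := out = quadrado_alt c
instance (c : Int) (out : Bool) : Decidable (Spec_quadrado c out) := by unfold Spec_quadrado; infer_instance

-- ===== CLAIM (what is proved, stated in full; the proofs are below) =====
def Claim_equal_quadrado : Prop := ∀ (c : Int), Dom_quadrado c → Spec_quadrado c (quadrado c)

-- ===== LEMMAS AND PROOFS =====

-- A's loop finds i = (c-1)/4 exactly when c ≡ 1 (mod 4) and c ≥ 5+4*(j-1)
theorem quadLoopA_eq (c j : Int) :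
    quadLoopA c j =
      if 5 + 4 * (j - 1) ≤ c ∧ (4 : Int) ∣ (c - 1) then some ((c - 1) / 4) else none := by
  fun_induction quadLoopA c j with
  | case1 j hle heq =>
    rw [if_pos ⟨hle, by omega⟩]
    congr 1
    omega
  | case2 j hle hne ih =>
    rw [ih]
    split_ifs with h1 h2 h2 <;> first | rfl | (exfalso; omega)
  | case3 j hle =>
    rw [if_neg]
    intro ⟨h1, _⟩
    omega

-- binary-search invariant: starting from lo² ≤ i < (hi+1)², the result r satisfies lo ≤ r and r² ≤ i < (r+1)²
theorem bsq_sound (i lo hi : Int) (h1 : lo ≤ hi) (h2 : lo * lo ≤ i)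
    (h3 : i < (hi + 1) * (hi + 1)) :
    lo ≤ bsq i lo hi ∧ bsq i lo hi * bsq i lo hi ≤ i ∧ i < (bsq i lo hi + 1) * (bsq i lo hi + 1) := by
  fun_induction bsq i lo hi with
  | case1 lo hi h mid hmid ih =>
    have hb := bsq_mid_bounds lo hi h
    have := ih hb.2 hmid h3
    exact ⟨le_trans (le_of_lt hb.1) this.1, this.2⟩
  | case2 lo hi h mid hmid ih =>
    have hb := bsq_mid_bounds lo hi h
    have := ih (by omega) h2 (by have : mid - 1 + 1 = mid := by ring
                                 rw [this]; omega)
    exact this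
  | case3 lo hi h =>
    have : lo = hi := le_antisymm h1 (le_of_not_gt h)
    exact ⟨le_refl _, h2, this ▸ h3⟩

theorem quadrado_spec : Claim_equal_quadrado := by
  intro c _
  unfold Spec_quadrado quadrado quadrado_alt
  rw [quadLoopA_eq]
  by_cases hc : 5 + 4 * ((1 : Int) - 1) ≤ c ∧ (4 : Int) ∣ (c - 1)
  · rw [if_pos hc]
    obtain ⟨hc5, hdvd⟩ := hc
    set i : Int := (c - 1) / 4 with hi
    have hieq : PySem.Int.floordiv (c - 1) 4 = i := by
      simp only [PySem.Int.floordiv, Int.fdiv_eq_ediv]; omega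
    have hcond : (decide (c < 5) || (PySem.Int.mod (c - 5) 4 != 0)) = false := by
      simp only [PySem.Int.mod, Int.fmod_eq_emod, Bool.or_eq_false_iff,
        decide_eq_false_iff_not, bne_eq_false_iff_eq]
      omega
    rw [hcond]
    simp only [Bool.false_eq_true, if_false, hieq]
    have hi1 : 1 ≤ i := by omega
    obtain ⟨hr0, hr1, hr2⟩ := bsq_sound i 0 i (by omega) (by omega)
      (by nlinarith)
    set r : Int := bsq i 0 i with hr
    rw [Bool.eq_iff_iff]
    simp only [List.any_eq_true, PySem.List.mem_pyRange_one, decide_eq_true_eq]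
    constructor
    · rintro ⟨n, ⟨hn1, hn2⟩, hni⟩
      have hnn : n * n = i := by rw [hni]; ring
      have hrn : r ≤ n := by nlinarith
      have hnr : n ≤ r := by nlinarith
      nlinarith
    · intro hri
      refine ⟨r, ⟨by nlinarith, by nlinarith⟩, by rw [← hri]; ring⟩
  · rw [if_neg hc]
    have : (decide (c < 5) || (PySem.Int.mod (c - 5) 4 != 0)) = true := by
      simp only [PySem.Int.mod, Int.fmod_eq_emod, Bool.or_eq_true, bne_iff_ne,
        decide_eq_true_eq]
      omega
    rw [this]
    rfl
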